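-- pv_equiv track=rewrite | github.com/sanskrit-lexicon/csl-inflect | nominals/pysanskritv2/tables/decline_one.py | md1_explain_alts
-- ===== SOURCE A (Python) =====
-- def md1_explain_alts(x,base,supstr):
--  """ returns a string. x is the declined form
--   assumes supstr contains alternates, separated by '/'
--  """
--  sups = supstr.split('/')
--  cats = [base + sup for sup in sups]
--  cat = '/'.join(cats)
--  if x == cat:
--   ans = "%s + %s = **%s**" %(base,supstr,x)
--  else:
--   ans = "%s + %s = %s -> **%s**" %(base,supstr,cat,x)
--  return ans
-- ===== SOURCE B (Python) =====
-- def md1_explain_alts(x, base, supstr):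
--     """ returns a string. x is the declined form
--      assumes supstr contains alternates, separated by '/'
--     """
--     pieces = [base]
--     for ch in supstr:
--         if ch == '/':
--             pieces.append('/' + base)
--         else:
--             pieces.append(ch)
--     cat = ''.join(pieces)
--     parts = [base, ' + ', supstr, ' = ']
--     if x != cat:
--         parts.append(cat)
--         parts.append(' -> ')
--     parts.append('**')
--     parts.append(x)
--     parts.append('**')
--     return ''.join(parts)
-- ===== Notes on version B (the rewrite author's own statement) =====
-- stated objective: alternative
-- what changed: cat is built in one character-by-character pass over supstr (inserting base after each '/') instead of split/comprehension/join, and the answer is assembled by joining a list of parts with a conditional arrow segment instead of two whole-line format strings.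
import Mathlib
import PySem

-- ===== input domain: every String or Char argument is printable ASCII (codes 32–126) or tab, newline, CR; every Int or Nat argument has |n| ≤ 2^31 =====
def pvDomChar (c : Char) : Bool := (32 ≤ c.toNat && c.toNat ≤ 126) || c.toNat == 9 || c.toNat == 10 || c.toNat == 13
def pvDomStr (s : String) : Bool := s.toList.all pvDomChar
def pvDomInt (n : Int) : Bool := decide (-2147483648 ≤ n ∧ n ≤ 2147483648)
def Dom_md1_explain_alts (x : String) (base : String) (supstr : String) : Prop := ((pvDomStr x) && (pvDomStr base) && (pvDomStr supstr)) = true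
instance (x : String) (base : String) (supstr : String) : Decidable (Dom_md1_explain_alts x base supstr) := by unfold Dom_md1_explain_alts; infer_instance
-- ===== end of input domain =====

-- B builds cat in one character-by-character pass (inserting base after each '/') and assembles
-- the answer by joining a parts list with a conditional arrow segment, instead of A's
-- split/comprehension/join plus two whole-line format strings (alternative decomposition; return value only).

-- ===== PORT A =====
def md1_explain_alts (x : String) (base : String) (supstr : String) : String :=
  let sups : List String := (PySem.Str.split? supstr "/").getD []
  let cats : List String := sups.map (fun sup => base ++ sup)
  let cat : String := PySem.Str.join "/" cats
  if x == cat then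
    base ++ " + " ++ supstr ++ " = **" ++ x ++ "**"
  else
    base ++ " + " ++ supstr ++ " = " ++ cat ++ " -> **" ++ x ++ "**"

-- ===== PORT B =====
def md1_explain_alts_alt (x : String) (base : String) (supstr : String) : String :=
  let pieces : List String := supstr.toList.foldl
    (fun ps ch => ps ++ [if ch = '/' then "/" ++ base else String.ofList [ch]]) [base]
  let cat : String := PySem.Str.join "" pieces
  let parts0 : List String := [base, " + ", supstr, " = "]
  let parts1 : List String := if x ≠ cat then parts0 ++ [cat, " -> "] else parts0
  PySem.Str.join "" (parts1 ++ ["**", x, "**"])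

-- ===== PRECONDITION & SPEC =====
def Spec_md1_explain_alts (x : String) (base : String) (supstr : String) (out : String) : Prop := out = md1_explain_alts_alt x base supstr
instance (x : String) (base : String) (supstr : String) (out : String) : Decidable (Spec_md1_explain_alts x base supstr out) := by unfold Spec_md1_explain_alts; infer_instance

-- ===== CLAIM (what is proved, stated in full; the proofs are below) =====
def Claim_equal_md1_explain_alts : Prop := ∀ (x : String) (base : String) (supstr : String), Dom_md1_explain_alts x base supstr → Spec_md1_explain_alts x base supstr (md1_explain_alts x base supstr)

-- ===== LEMMAS AND PROOFS =====

-- splitOn cs ['/'] written as a direct structural recursion (no accumulators)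
def pvMySplit : List Char → List (List Char)
  | [] => [[]]
  | c :: t =>
    match pvMySplit t with
    | [] => []
    | h :: tl => if c = '/' then [] :: h :: tl else (c :: h) :: tl

-- prepend p onto the first piece
def pvConsHead (p : List Char) : List (List Char) → List (List Char)
  | [] => [p]
  | h :: tl => (p ++ h) :: tl

-- base inserted after every '/', character by character
def pvRepl (bs : List Char) (cs : List Char) : List Char :=
  cs.flatMap (fun c => if c = '/' then '/' :: bs else [c])

theorem pvMySplit_ne_nil (t : List Char) : pvMySplit t ≠ [] := by
  induction t with
  | nil => simp [pvMySplit]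
  | cons c t ih =>
    rcases h : pvMySplit t with _ | ⟨hd, tl⟩
    · exact absurd h ih
    · simp only [pvMySplit, h]
      split <;> simp

theorem pvSplitOn_go_eq (l cur : List Char) (acc : List (List Char)) (fuel : Nat)
    (h : l.length < fuel) :
    PySem.Chars.splitOn.go ['/'] fuel l cur acc
      = acc.reverse ++ pvConsHead cur.reverse (pvMySplit l) := by
  induction l generalizing cur acc fuel with
  | nil =>
    cases fuel with
    | zero => omega
    | succ n => simp [PySem.Chars.splitOn.go, pvMySplit, pvConsHead]
  | cons c t ih =>
    cases fuel with
    | zero => omega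
    | succ n =>
      have ht : t.length < n := by simpa using h
      by_cases hc : c = '/'
      · subst hc
        rw [show PySem.Chars.splitOn.go ['/'] (n+1) ('/' :: t) cur acc
              = PySem.Chars.splitOn.go ['/'] n t [] (cur.reverse :: acc) by
            simp [PySem.Chars.splitOn.go, List.isPrefixOf]]
        rw [ih [] (cur.reverse :: acc) n ht]
        rcases hm : pvMySplit t with _ | ⟨hd, tl⟩
        · exact absurd hm (pvMySplit_ne_nil t)
        · simp [pvMySplit, hm, pvConsHead]
      · rw [show PySem.Chars.splitOn.go ['/'] (n+1) (c :: t) cur acc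
              = PySem.Chars.splitOn.go ['/'] n t (c :: cur) acc by
            simp [PySem.Chars.splitOn.go, List.isPrefixOf, Ne.symm hc]]
        rw [ih (c :: cur) acc n ht]
        rcases hm : pvMySplit t with _ | ⟨hd, tl⟩
        · exact absurd hm (pvMySplit_ne_nil t)
        · simp [pvMySplit, hm, pvConsHead, hc]

theorem pvSplitOn_eq (cs : List Char) : PySem.Chars.splitOn cs ['/'] = pvMySplit cs := by
  unfold PySem.Chars.splitOn
  rw [pvSplitOn_go_eq cs [] [] (cs.length + 1) (by omega)]
  rcases hm : pvMySplit cs with _ | ⟨hd, tl⟩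
  · exact absurd hm (pvMySplit_ne_nil cs)
  · simp [pvConsHead]

theorem pvJoin_map_eq (bs : List Char) (cs : List Char) :
    PySem.Chars.join ['/'] ((pvMySplit cs).map (fun l => bs ++ l)) = bs ++ pvRepl bs cs := by
  induction cs with
  | nil => simp [pvMySplit, PySem.Chars.join_singleton, pvRepl]
  | cons c t ih =>
    rcases hm : pvMySplit t with _ | ⟨hd, tl⟩
    · exact absurd hm (pvMySplit_ne_nil t)
    · rw [hm] at ih
      by_cases hc : c = '/'
      · subst hc
        simp only [pvMySplit, hm, if_true, List.map_cons]
        rw [PySem.Chars.join_cons_cons]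
        simp only [List.map_cons] at ih
        rw [ih]
        simp [pvRepl]
      · simp only [pvMySplit, hm, if_neg hc, List.map_cons]
        cases tl with
        | nil =>
          simp only [List.map_nil, List.map_cons] at ih ⊢
          rw [PySem.Chars.join_singleton]
          rw [PySem.Chars.join_singleton] at ih
          have hhd : hd = pvRepl bs t := List.append_cancel_left ih
          simp [pvRepl, hc, hhd]
        | cons q r =>
          simp only [List.map_cons] at ih ⊢
          rw [PySem.Chars.join_cons_cons]
          rw [PySem.Chars.join_cons_cons] at ih
          have : hd ++ ['/'] ++ PySem.Chars.join ['/'] ((bs ++ q) :: r.map (fun l => bs ++ l))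
              = pvRepl bs t := by
            apply List.append_cancel_left (as := bs)
            simpa [List.append_assoc] using ih
          simp only [pvRepl, List.flatMap_cons, if_neg hc]
          have ht : List.flatMap (fun ch => if ch = '/' then '/' :: bs else [ch]) t = pvRepl bs t := rfl
          rw [ht, ← this]
          simp [List.append_assoc]

-- joining with the empty separator is flattening
theorem pvJoin_empty (l : List (List Char)) : PySem.Chars.join [] l = l.flatten := by
  induction l with
  | nil => simp [PySem.Chars.join_nil]
  | cons a t ih =>
    cases t with
    | nil => simp [PySem.Chars.join_singleton]
    | cons b r =>
      rw [PySem.Chars.join_cons_cons, ih]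
      simp

theorem pvStrJoin_empty (l : List String) :
    (PySem.Str.join "" l).toList = (l.map String.toList).flatten := by
  simp only [PySem.Str.join, String.toList_ofList]
  rw [show ("" : String).toList = [] from rfl, pvJoin_empty]

-- B's fold builds pieces whose flattening is bs ++ pvRepl bs cs
theorem pvFold_pieces (bs : List Char) (cs : List Char) (ps : List String) :
    (((cs.foldl (fun ps ch => ps ++ [if ch = '/' then String.ofList ('/' :: bs) else String.ofList [ch]]) ps).map String.toList).flatten)
      = (ps.map String.toList).flatten ++ pvRepl bs cs := by
  induction cs generalizing ps with
  | nil => simp [pvRepl]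
  | cons c t ih =>
    simp only [List.foldl_cons]
    rw [ih]
    by_cases hc : c = '/' <;>
      simp [hc, pvRepl, List.append_assoc, String.toList_ofList]

-- the two cats agree
theorem pvCat_eq (base supstr : String) :
    PySem.Str.join "/" (((PySem.Str.split? supstr "/").getD []).map (fun sup => base ++ sup))
      = PySem.Str.join "" (supstr.toList.foldl
          (fun ps ch => ps ++ [if ch = '/' then "/" ++ base else String.ofList [ch]]) [base]) := by
  apply String.toList_inj.mp
  rw [pvStrJoin_empty]
  have hslash : ("/" ++ base : String) = String.ofList ('/' :: base.toList) := by
    apply String.toList_inj.mp; simp [String.toList_ofList]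
  rw [hslash, pvFold_pieces base.toList supstr.toList [base]]
  have hsep : ("/" : String).toList = ['/'] := by decide
  simp only [PySem.Str.join, PySem.Str.split?, PySem.Chars.split?, hsep,
    List.isEmpty_cons, Bool.false_eq_true, if_false, Option.map_some,
    Option.getD_some, String.toList_ofList, List.map_map]
  rw [pvSplitOn_eq]
  have hmap : List.map (String.toList ∘ (fun sup => base ++ sup) ∘ String.ofList) (pvMySplit supstr.toList)
      = (pvMySplit supstr.toList).map (fun l => base.toList ++ l) := by
    simp [Function.comp_def]
  rw [hmap, pvJoin_map_eq]
  simp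

-- ===== VERDICT (by name: the statement is the Claim_ definition above) =====
theorem md1_explain_alts_spec : Claim_equal_md1_explain_alts := by
  intro x base supstr _
  show md1_explain_alts x base supstr = md1_explain_alts_alt x base supstr
  simp only [md1_explain_alts, md1_explain_alts_alt]
  rw [← pvCat_eq base supstr]
  set cat := PySem.Str.join "/" (((PySem.Str.split? supstr "/").getD []).map (fun sup => base ++ sup)) with hcat
  by_cases h : x = cat
  · simp only [h, beq_self_eq_true, if_true, ne_eq, not_true_eq_false, if_false]
    apply String.toList_inj.mp
    rw [pvStrJoin_empty]
    simp
  · have hb : (x == cat) = false := beq_eq_false_iff_ne.mpr h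
    simp only [hb, Bool.false_eq_true, if_false, ne_eq, h, not_false_eq_true, if_true]
    apply String.toList_inj.mp
    rw [pvStrJoin_empty]
    simp
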